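-- pv_equiv track=rewrite | github.com/Anchals24/100daysofcoding | 1150-check-if-a-number-is-majority-element-in-a-sorted-array/1150-check-if-a-number-is-majority-element-in-a-sorted-array.py | isMajorityElement
-- ===== SOURCE A (Python) =====
-- from typing import List
--
-- def isMajorityElement(nums: List[int], target: int) -> bool:
--     D = {}
--     majority = len(nums) // 2
--     for n in nums:
--         if n in D:
--             D[n] += 1
--         else:
--             D[n] = 1
--     if target in D and D[target] > majority:
--         return True
--     return False
-- ===== SOURCE B (Python) =====
-- def isMajorityElement(nums, target):
--     # divide-and-conquer: count occurrences of target by recursively splitting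
--     # the list in half, then compare doubled count with the length
--     # (count > len//2  <=>  2*count > len for nonnegative len).
--     def cnt(xs):
--         if len(xs) <= 1:
--             return 1 if xs and xs[0] == target else 0
--         mid = len(xs) // 2
--         return cnt(xs[:mid]) + cnt(xs[mid:])
--     return 2 * cnt(nums) > len(nums)
-- ===== Notes on version B (the rewrite author's own statement) =====
-- stated objective: alternative
-- what changed: B replaces A's dictionary-counting pass with a divide-and-conquer recursion that counts the target by splitting the list in halves, and compares the doubled count with the length instead of using len//2.
import Mathlib
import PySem

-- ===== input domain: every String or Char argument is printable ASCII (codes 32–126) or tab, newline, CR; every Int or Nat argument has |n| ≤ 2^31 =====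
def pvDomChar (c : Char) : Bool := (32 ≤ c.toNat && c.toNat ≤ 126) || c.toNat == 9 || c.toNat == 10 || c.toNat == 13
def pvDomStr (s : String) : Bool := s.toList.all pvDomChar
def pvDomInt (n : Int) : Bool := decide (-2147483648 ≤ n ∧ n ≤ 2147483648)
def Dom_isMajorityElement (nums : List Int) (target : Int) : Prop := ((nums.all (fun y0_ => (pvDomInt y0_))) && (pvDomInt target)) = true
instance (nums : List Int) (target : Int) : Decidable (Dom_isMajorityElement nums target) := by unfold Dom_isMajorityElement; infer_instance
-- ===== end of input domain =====

-- B replaces A's dictionary-counting pass with a divide-and-conquer count of the target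
-- and compares the doubled count with the length; same values, alternative structure.

-- ===== PORT A =====
-- D = {}; for n in nums: if n in D: D[n]+=1 else: D[n]=1; return target in D and D[target] > len(nums)//2
def isMajorityElement (nums : List Int) (target : Int) : Bool :=
  let majority : Int := PySem.Int.floordiv (nums.length : Int) 2
  let D : PySem.Dict Int Int :=
    nums.foldl (fun d n => if d.contains n then d.modify n 0 (· + 1) else d.insert n 1) PySem.Dict.empty
  if D.contains target && D.getD target 0 > majority then true else false

-- ===== PORT B =====
-- cnt(xs): base case for len<=1, otherwise split at len//2 and recurse on both halves
def cntHalves (target : Int) (xs : List Int) : Int :=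
  if _h : xs.length ≤ 1 then
    match xs with
    | [] => 0
    | x :: _ => if x == target then 1 else 0
  else
    -- mid = len(xs)//2
    cntHalves target (xs.take (xs.length / 2)) + cntHalves target (xs.drop (xs.length / 2))
termination_by xs.length
decreasing_by
  · simp only [List.length_take]; omega
  · simp only [List.length_drop]; omega

-- return 2 * cnt(nums) > len(nums)
def isMajorityElement_alt (nums : List Int) (target : Int) : Bool :=
  decide (2 * cntHalves target nums > (nums.length : Int))

-- ===== PRECONDITION & SPEC =====
def Spec_isMajorityElement (nums : List Int) (target : Int) (out : Bool) : Prop := out = isMajorityElement_alt nums target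
instance (nums : List Int) (target : Int) (out : Bool) : Decidable (Spec_isMajorityElement nums target out) := by unfold Spec_isMajorityElement; infer_instance

-- ===== CLAIM =====
def Claim_equal_isMajorityElement : Prop := ∀ (nums : List Int) (target : Int), Dom_isMajorityElement nums target → Spec_isMajorityElement nums target (isMajorityElement nums target)

-- ===== LEMMAS AND PROOFS =====
-- A's counting loop: resulting dict maps v to prior default-count plus l.count v.
theorem foldl_count_getD (l : List Int) (d : PySem.Dict Int Int) (v : Int) :
    (l.foldl (fun d n => if d.contains n then d.modify n 0 (· + 1) else d.insert n 1) d).getD v 0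
      = d.getD v 0 + l.count v := by
  induction l generalizing d with
  | nil => simp
  | cons x xs ih =>
    simp only [List.foldl_cons, ih, List.count_cons]
    by_cases hc : d.contains x = true
    · rw [if_pos hc, PySem.Dict.getD_modify]
      by_cases hvx : v = x
      · subst hvx; simp; ring
      · rw [if_neg hvx]
        have : (x == v) = false := by simp; exact fun h => hvx h.symm
        simp [this]
    · rw [if_neg hc]
      by_cases hvx : v = x
      · subst hvx
        rw [PySem.Dict.getD_insert_self,
          PySem.Dict.getD_of_not_contains (h := by simpa using hc)]
        simp; omega
      · rw [PySem.Dict.getD_insert_of_ne (hne := fun h => hvx h)]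
        have : (x == v) = false := by simp; exact fun h => hvx h.symm
        simp [this]

theorem foldl_count_contains (l : List Int) (d : PySem.Dict Int Int) (v : Int) :
    (l.foldl (fun d n => if d.contains n then d.modify n 0 (· + 1) else d.insert n 1) d).contains v
      = (d.contains v || decide (v ∈ l)) := by
  induction l generalizing d with
  | nil => simp
  | cons x xs ih =>
    simp only [List.foldl_cons, ih]
    by_cases hc : d.contains x = true
    · rw [if_pos hc, PySem.Dict.contains_modify]
      by_cases hvx : v = x
      · subst hvx; simp [hc]
      · have hb : (v == x) = false := by simp; exact hvx
        simp [hb, hvx]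
    · rw [if_neg hc, PySem.Dict.contains_insert]
      by_cases hvx : v = x
      · subst hvx; simp
      · have hb : (v == x) = false := by simp; exact hvx
        simp [hb, hvx]

-- B's divide-and-conquer count is the list count.
theorem cntHalves_eq_count (target : Int) (xs : List Int) :
    cntHalves target xs = (xs.count target : Int) := by
  induction hn : xs.length using Nat.strong_induction_on generalizing xs with
  | _ n ih =>
    unfold cntHalves
    by_cases h : xs.length ≤ 1
    · rw [dif_pos h]
      match xs with
      | [] => simp
      | [x] => by_cases hx : x = target <;> simp [hx]
      | x :: y :: rest => simp at h
    · rw [dif_neg h]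
      have h2 : 2 ≤ xs.length := by omega
      have ht := ih (xs.take (xs.length / 2)).length (by subst hn; simp; omega) _ rfl
      have hd := ih (xs.drop (xs.length / 2)).length (by subst hn; simp; omega) _ rfl
      rw [ht, hd, ← Nat.cast_add, ← List.count_append, List.take_append_drop]

-- ===== VERDICT =====
theorem isMajorityElement_spec : Claim_equal_isMajorityElement := by
  intro nums target _
  unfold Spec_isMajorityElement isMajorityElement isMajorityElement_alt
  simp only [foldl_count_getD, foldl_count_contains, PySem.Dict.getD_empty,
    PySem.Dict.contains_empty, Bool.false_or, zero_add, cntHalves_eq_count]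
  have hfd : PySem.Int.floordiv (nums.length : Int) 2 = ((nums.length / 2 : Nat) : Int) := by
    simp only [PySem.Int.floordiv]
    rw [Int.fdiv_eq_ediv_of_nonneg _ (by norm_num)]
    omega
  rw [hfd]
  by_cases hmem : target ∈ nums
  · have hle : nums.count target ≤ nums.length := List.count_le_length
    simp only [hmem, decide_true, Bool.true_and, gt_iff_lt]
    by_cases h : ((nums.length / 2 : Nat) : Int) < (nums.count target : Int)
    · have h2 : (nums.length : Int) < 2 * (nums.count target : Int) := by omega
      simp [h2]
      omega
    · have h2 : ¬ ((nums.length : Int) < 2 * (nums.count target : Int)) := by omega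
      simp [h2]
      omega
  · have h0 : nums.count target = 0 := List.count_eq_zero.mpr hmem
    simp [hmem, h0]
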